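-- pv_equiv track=rewrite | github.com/daniilprohorov/symbol | main.py | simpleParse
-- ===== SOURCE A (Python) =====
-- def error(msg):
--     raise Exception(msg)
--
-- def head(xs):
--     if xs == []:
--         error('Can`t get head. Empty list')
--     else:
--         return xs[0]
--
-- def tail(xs):
--     if xs == []:
--         error('Can`t get tail. Empty list')
--     else:
--         return xs[1:]
--
-- def untilLast(xs):
--     return xs[:-1]
--
-- def bracketFind(c):
--     if c == '(':
--         return 1
--     elif c == ')':
--         return (-1)
--     else:
--         return 0
--
-- def simpleParse(strInp, deep = 0, output = None, outputFlagSnd = False):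
--     if output == None:
--         #fst = f tag, snd = arguments
--         output = ['', '', '']
--
--     if list(strInp) == []:
--         returnOutput = (untilLast(output[0]), output[1], untilLast(output[2]))
--         return returnOutput
--
--     else:
--         x = head(strInp)
--         xs = tail(strInp)
--         bracket = bracketFind(x)
--         if (deep == 0) and (bracket < 0):
--             error("Parsing brackets error")
--         else:
--             if (deep == 1) and (outputFlagSnd == False) and (x == ','):
--                 outputFlagSnd = True
--
--             if deep == 0:
--                 output[0] += x
--             elif outputFlagSnd == False:
--                 output[1] += x
--             else:
--                 if ((x != ',') or (deep != 1)):
--                     output[2] += x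
--
--             deep += bracket
--             return simpleParse(xs, deep, output, outputFlagSnd)
-- ===== SOURCE B (Python) =====
-- def simpleParse(strInp, deep=0, output=None, outputFlagSnd=False):
--     # One linear pass of bookkeeping (depth prefix list), then the three output
--     # components are read off by comprehensions -- no recursion, no quadratic slicing.
--     a, b, c = ('', '', '') if output is None else (output[0], output[1], output[2])
--     depths = []
--     d = deep
--     for ch in strInp:
--         depths.append(d)
--         d += (ch == '(') - (ch == ')')
--     pairs = list(zip(strInp, depths))
--     if any(ch == ')' and dp == 0 for ch, dp in pairs):
--         raise Exception("Parsing brackets error")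
--     if outputFlagSnd:
--         pre, post = [], pairs
--     else:
--         j = next((i for i, p in enumerate(pairs) if p[1] == 1 and p[0] == ','), len(pairs))
--         pre, post = pairs[:j], pairs[j:]
--     a += ''.join(ch for ch, dp in pairs if dp == 0)
--     b += ''.join(ch for ch, dp in pre if dp != 0)
--     c += ''.join(ch for ch, dp in post if dp != 0 and not (ch == ',' and dp == 1))
--     return (a[:-1], b, c[:-1])
-- ===== Notes on version B (the rewrite author's own statement) =====
-- stated objective: faster
-- what changed: Replaces A's per-character recursion with string slicing and a mutated 3-slot list by a single linear pass that records the bracket depth of every character, finds the first top-level comma once, and then extracts the three components with comprehensions over (char, depth) pairs.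
import Mathlib
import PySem

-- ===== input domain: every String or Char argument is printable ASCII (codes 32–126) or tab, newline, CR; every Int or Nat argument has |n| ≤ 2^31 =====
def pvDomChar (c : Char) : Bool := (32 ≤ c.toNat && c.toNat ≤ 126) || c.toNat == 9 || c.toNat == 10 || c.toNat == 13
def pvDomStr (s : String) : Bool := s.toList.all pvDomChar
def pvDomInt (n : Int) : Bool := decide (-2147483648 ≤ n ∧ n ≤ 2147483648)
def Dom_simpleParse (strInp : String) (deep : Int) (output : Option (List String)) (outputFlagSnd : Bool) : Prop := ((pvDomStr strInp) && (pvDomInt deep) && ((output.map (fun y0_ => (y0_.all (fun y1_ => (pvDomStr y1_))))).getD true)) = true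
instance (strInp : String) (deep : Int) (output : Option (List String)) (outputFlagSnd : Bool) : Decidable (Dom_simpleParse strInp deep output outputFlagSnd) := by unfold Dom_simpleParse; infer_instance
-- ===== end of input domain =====

-- B replaces A's per-character recursion with slicing (and in-place mutation of `output`, which the
-- Lean equivalence — about the RETURN value only — does not model) by one linear depth-annotating
-- pass plus comprehensions; objective: faster (asymptotic).

-- ===== PORT A =====
def bracketFind (c : Char) : Int := if c = '(' then 1 else if c = ')' then (-1) else 0

-- s[:-1] (exact for every string; a [:-1] slice never raises)
def untilLast (s : String) : String := String.ofList s.toList.dropLast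

-- the recursion of A's simpleParse over the characters of strInp; `out` is the Python list `output`
def simpleParseGo : List Char → Int → List String → Bool → List String
  | [], _, out, _ => [untilLast (out.getD 0 ""), out.getD 1 "", untilLast (out.getD 2 "")]
  | x :: xs, deep, out, flag =>
    let bracket := bracketFind x
    if deep = 0 ∧ bracket < 0 then []   -- Python A raises its brackets Exception here; excluded by Pre_
    else
      let flag' := if deep = 1 ∧ flag = false ∧ x = ',' then true else flag
      let out' :=
        if deep = 0 then out.set 0 (out.getD 0 "" ++ String.ofList [x])
        else if flag' = false then out.set 1 (out.getD 1 "" ++ String.ofList [x])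
        else if x ≠ ',' ∨ deep ≠ 1 then out.set 2 (out.getD 2 "" ++ String.ofList [x])
        else out
      simpleParseGo xs (deep + bracket) out' flag'

def simpleParse (strInp : String) (deep : Int) (output : Option (List String)) (outputFlagSnd : Bool) : List String :=
  simpleParseGo strInp.toList deep (match output with | none => ["", "", ""] | some l => l) outputFlagSnd

-- ===== PORT B =====
-- the `depths` loop of Source B
def depthsLoop (d : Int) : List Char → List Int
  | [] => []
  | ch :: cs => d :: depthsLoop (d + ((if ch = '(' then 1 else 0) - (if ch = ')' then 1 else 0))) cs

def simpleParse_alt (strInp : String) (deep : Int) (output : Option (List String)) (outputFlagSnd : Bool) : List String :=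
  let a0 := match output with | none => "" | some l => l.getD 0 ""   -- output[0]; in range under Pre_
  let b0 := match output with | none => "" | some l => l.getD 1 ""
  let c0 := match output with | none => "" | some l => l.getD 2 ""
  let pairs := strInp.toList.zip (depthsLoop deep strInp.toList)
  if pairs.any (fun p => p.1 == ')' && p.2 == 0) then []   -- Source B raises here; excluded by Pre_
  else
    let (pre, post) :=
      if outputFlagSnd then (([] : List (Char × Int)), pairs)
      else
        let j := match pairs.findIdx? (fun p => p.2 == 1 && p.1 == ',') with
                 | some i => i
                 | none => pairs.length
        (pairs.take j, pairs.drop j)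
    let a := a0 ++ String.ofList ((pairs.filter (fun p => p.2 == 0)).map Prod.fst)
    let b := b0 ++ String.ofList ((pre.filter (fun p => p.2 != 0)).map Prod.fst)
    let c := c0 ++ String.ofList ((post.filter (fun p => p.2 != 0 && !(p.1 == ',' && p.2 == 1))).map Prod.fst)
    [untilLast a, b, untilLast c]

-- ===== PRECONDITION & SPEC =====
def strBal (l : List Char) : Int := (l.count '(' : Int) - (l.count ')' : Int)

-- Pre_ = exactly the inputs where Python A returns: the given output list (if any) has the three
-- slots A indexes (else IndexError), and no closing bracket is met at nesting depth 0 (there A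
-- raises its parsing Exception).
def Pre_simpleParse (strInp : String) (deep : Int) (output : Option (List String)) (outputFlagSnd : Bool) : Prop :=
  (∀ l ∈ output, 3 ≤ l.length) ∧
  ∀ i : Nat, i < strInp.toList.length → strInp.toList.getD i ' ' = ')' →
    deep + strBal (strInp.toList.take i) ≠ 0

instance (strInp : String) (deep : Int) (output : Option (List String)) (outputFlagSnd : Bool) : Decidable (Pre_simpleParse strInp deep output outputFlagSnd) := by unfold Pre_simpleParse; infer_instance

def pvWitness_simpleParse : String × Int × Option (List String) × Bool := ("f(a,b)", 0, none, false)

def Spec_simpleParse (strInp : String) (deep : Int) (output : Option (List String)) (outputFlagSnd : Bool) (out : List String) : Prop := out = simpleParse_alt strInp deep output outputFlagSnd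
instance (strInp : String) (deep : Int) (output : Option (List String)) (outputFlagSnd : Bool) (out : List String) : Decidable (Spec_simpleParse strInp deep output outputFlagSnd out) := by unfold Spec_simpleParse; infer_instance

-- ===== CLAIM (what is proved, stated in full; the proofs are below) =====
def Claim_equal_simpleParse : Prop := ∀ (strInp : String) (deep : Int) (output : Option (List String)) (outputFlagSnd : Bool), Dom_simpleParse strInp deep output outputFlagSnd → Pre_simpleParse strInp deep output outputFlagSnd → Spec_simpleParse strInp deep output outputFlagSnd (simpleParse strInp deep output outputFlagSnd)

-- ===== LEMMAS AND PROOFS =====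

-- per-character classification of A's recursion, as pure list functions
def partA : List Char → Int → List Char
  | [], _ => []
  | x :: xs, d =>
    if d = 0 then x :: partA xs (d + bracketFind x) else partA xs (d + bracketFind x)

def partB : List Char → Int → Bool → List Char
  | [], _, _ => []
  | x :: xs, d, flag =>
    let flag' := if d = 1 ∧ flag = false ∧ x = ',' then true else flag
    if d ≠ 0 ∧ flag' = false then x :: partB xs (d + bracketFind x) flag'
    else partB xs (d + bracketFind x) flag'

def partC : List Char → Int → Bool → List Char
  | [], _, _ => []
  | x :: xs, d, flag =>
    let flag' := if d = 1 ∧ flag = false ∧ x = ',' then true else flag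
    if d ≠ 0 ∧ flag' = true ∧ (x ≠ ',' ∨ d ≠ 1) then x :: partC xs (d + bracketFind x) flag'
    else partC xs (d + bracketFind x) flag'

-- error-freedom of A's recursion, recursively
def noErr : List Char → Int → Bool
  | [], _ => true
  | x :: xs, d => (!(x = ')' && decide (d = 0))) && noErr xs (d + bracketFind x)

lemma strBal_cons (x : Char) (l : List Char) : strBal (x :: l) = bracketFind x + strBal l := by
  simp only [strBal, bracketFind, List.count_cons]
  split_ifs with h1 h2 <;> simp_all <;> omega

lemma pre_to_noErr (cs : List Char) : ∀ d : Int,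
    (∀ i : Nat, i < cs.length → cs.getD i ' ' = ')' → d + strBal (cs.take i) ≠ 0) →
    noErr cs d = true := by
  induction cs with
  | nil => intro d _; rfl
  | cons x xs ih =>
    intro d h
    have h0 := h 0 (by simp) ; simp [strBal] at h0
    have hrest : ∀ i : Nat, i < xs.length → xs.getD i ' ' = ')' →
        (d + bracketFind x) + strBal (xs.take i) ≠ 0 := by
      intro i hi hc
      have := h (i + 1) (by simpa using Nat.succ_lt_succ hi) (by simpa using hc)
      simpa [List.take_succ_cons, strBal_cons, add_assoc] using this
    simp only [noErr, Bool.and_eq_true, Bool.not_eq_eq_eq_not, Bool.not_true, ih _ hrest, and_true]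
    by_cases hx : x = ')'
    · simp [hx, h0 hx]
    · simp [hx]

lemma depthsLoop_cons (d : Int) (x : Char) (xs : List Char) :
    depthsLoop d (x :: xs) = d :: depthsLoop (d + bracketFind x) xs := by
  simp only [depthsLoop, bracketFind]
  split_ifs with h1 h2 <;> simp_all <;> omega

lemma anyErr_eq (cs : List Char) : ∀ d : Int,
    (cs.zip (depthsLoop d cs)).any (fun p => p.1 == ')' && p.2 == 0) = !noErr cs d := by
  induction cs with
  | nil => intro d; rfl
  | cons x xs ih =>
    intro d
    rw [depthsLoop_cons, List.zip_cons_cons, List.any_cons, ih, noErr]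
    simp [Bool.not_and, Bool.beq_eq_decide_eq]

lemma getD_set_self (l : List String) (s : String) (i : Nat) (h : i < l.length) :
    (l.set i s).getD i "" = s := by
  simp [List.getD]; rw [List.getElem?_set_self (by simpa using h)]; rfl
lemma getD_set_ne (l : List String) (s : String) (i j : Nat) (h : i ≠ j) :
    (l.set i s).getD j "" = l.getD j "" := by
  simp [List.getD]; rw [List.getElem?_set_ne h]
lemma append_ofList_cons (s : String) (x : Char) (l : List Char) :
    s ++ String.ofList [x] ++ String.ofList l = s ++ String.ofList (x :: l) := by
  rw [show (x :: l) = [x] ++ l from rfl, String.ofList_append, ← String.append_assoc]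
lemma go_cons (x : Char) (xs : List Char) (d : Int) (out : List String) (flag : Bool)
    (hnoerr : ¬ (d = 0 ∧ bracketFind x < 0)) :
    simpleParseGo (x :: xs) d out flag =
      (let flag' := if d = 1 ∧ flag = false ∧ x = ',' then true else flag
       let out' :=
        if d = 0 then out.set 0 (out.getD 0 "" ++ String.ofList [x])
        else if flag' = false then out.set 1 (out.getD 1 "" ++ String.ofList [x])
        else if x ≠ ',' ∨ d ≠ 1 then out.set 2 (out.getD 2 "" ++ String.ofList [x])
        else out
       simpleParseGo xs (d + bracketFind x) out' flag') := by
  rw [simpleParseGo]; exact if_neg hnoerr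

lemma goA_eq (cs : List Char) : ∀ (d : Int) (out : List String) (flag : Bool),
    3 ≤ out.length → noErr cs d = true →
    simpleParseGo cs d out flag =
      [untilLast (out.getD 0 "" ++ String.ofList (partA cs d)),
       out.getD 1 "" ++ String.ofList (partB cs d flag),
       untilLast (out.getD 2 "" ++ String.ofList (partC cs d flag))] := by
  induction cs with
  | nil => intro d out flag _ _; simp [simpleParseGo, partA, partB, partC]
  | cons x xs ih =>
    intro d out flag hlen hne
    simp only [noErr, Bool.and_eq_true, Bool.not_eq_eq_eq_not, Bool.not_true] at hne
    obtain ⟨hhead, htail⟩ := hne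
    have hnoerr : ¬ (d = 0 ∧ bracketFind x < 0) := by
      rintro ⟨hd0, hbr⟩
      simp only [bracketFind] at hbr
      split_ifs at hbr with h1 h2
      · omega
      · simp [h2, hd0] at hhead
      · omega
    rw [go_cons _ _ _ _ _ hnoerr, partA, partB, partC]
    dsimp only
    by_cases hd : d = 0
    · have hA : (if d = 1 ∧ flag = false ∧ x = ',' then true else flag) = flag :=
        if_neg (by rintro ⟨h, -⟩; omega)
      rw [hA, if_pos hd, if_pos hd,
        if_neg (show ¬ (d ≠ 0 ∧ flag = false) from fun h => h.1 hd),
        if_neg (show ¬ (d ≠ 0 ∧ flag = true ∧ (x ≠ ',' ∨ d ≠ 1)) from fun h => h.1 hd),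
        ih _ _ _ (by simpa using hlen) htail,
        getD_set_self _ _ _ (by omega), getD_set_ne _ _ _ _ (by omega),
        getD_set_ne _ _ _ _ (by omega), append_ofList_cons]
    · by_cases hf : (if d = 1 ∧ flag = false ∧ x = ',' then true else flag) = false
      · rw [if_neg hd, hf, if_pos (show (false:Bool) = false from rfl),
          if_pos (show d ≠ 0 ∧ (false:Bool) = false from ⟨hd, rfl⟩),
          if_neg (show ¬ (d ≠ 0 ∧ (false:Bool) = true ∧ (x ≠ ',' ∨ d ≠ 1)) from fun h => by simpa using h.2.1),
          ih _ _ _ (by simpa using hlen) htail,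
          getD_set_self _ _ _ (by omega), getD_set_ne _ _ _ _ (by omega),
          getD_set_ne _ _ _ _ (by omega), append_ofList_cons, if_neg hd]
      · have hft : (if d = 1 ∧ flag = false ∧ x = ',' then true else flag) = true := by
          revert hf; cases h : (if d = 1 ∧ flag = false ∧ x = ',' then true else flag) <;> simp
        by_cases hc : x ≠ ',' ∨ d ≠ 1
        · rw [if_neg hd, hft, if_neg (show ¬ (true:Bool) = false by simp), if_pos hc,
            if_neg (show ¬ (d ≠ 0 ∧ (true:Bool) = false) from fun h => by simpa using h.2),
            if_pos (show d ≠ 0 ∧ (true:Bool) = true ∧ (x ≠ ',' ∨ d ≠ 1) from ⟨hd, rfl, hc⟩),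
            ih _ _ _ (by simpa using hlen) htail,
            getD_set_self _ _ _ (by omega), getD_set_ne _ _ _ _ (by omega),
            getD_set_ne _ _ _ _ (by omega), append_ofList_cons, if_neg hd]
        · rw [if_neg hd, hft, if_neg (show ¬ (true:Bool) = false by simp), if_neg hc,
            if_neg (show ¬ (d ≠ 0 ∧ (true:Bool) = false) from fun h => by simpa using h.2),
            if_neg (show ¬ (d ≠ 0 ∧ (true:Bool) = true ∧ (x ≠ ',' ∨ d ≠ 1)) from fun h => hc h.2.2),
            ih _ _ _ hlen htail, if_neg hd]

-- B-side characterisations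
lemma partA_filter (cs : List Char) : ∀ d : Int,
    partA cs d = ((cs.zip (depthsLoop d cs)).filter (fun p => p.2 == 0)).map Prod.fst := by
  induction cs with
  | nil => intro d; rfl
  | cons x xs ih =>
    intro d
    rw [depthsLoop_cons, partA]
    by_cases hd : d = 0 <;> simp [hd, ih]

lemma partB_true (cs : List Char) : ∀ d : Int, partB cs d true = [] := by
  induction cs with
  | nil => intro d; rfl
  | cons x xs ih =>
    intro d
    rw [partB]
    simp [ih]

lemma partC_true (cs : List Char) : ∀ d : Int,
    partC cs d true =
      ((cs.zip (depthsLoop d cs)).filter (fun p => p.2 != 0 && !(p.1 == ',' && p.2 == 1))).map Prod.fst := by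
  induction cs with
  | nil => intro d; rfl
  | cons x xs ih =>
    intro d
    rw [depthsLoop_cons, partC]
    by_cases h1 : d = 0 <;> by_cases h2 : x = ',' <;> by_cases h3 : d = 1 <;>
      simp_all

lemma partBC_false (cs : List Char) : ∀ d : Int,
    partB cs d false =
      (((cs.zip (depthsLoop d cs)).take
          (match (cs.zip (depthsLoop d cs)).findIdx? (fun p => p.2 == 1 && p.1 == ',') with
           | some i => i
           | none => (cs.zip (depthsLoop d cs)).length)).filter (fun p => p.2 != 0)).map Prod.fst ∧
    partC cs d false =
      (((cs.zip (depthsLoop d cs)).drop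
          (match (cs.zip (depthsLoop d cs)).findIdx? (fun p => p.2 == 1 && p.1 == ',') with
           | some i => i
           | none => (cs.zip (depthsLoop d cs)).length)).filter
          (fun p => p.2 != 0 && !(p.1 == ',' && p.2 == 1))).map Prod.fst := by
  induction cs with
  | nil => intro d; exact ⟨rfl, rfl⟩
  | cons x xs ih =>
    intro d
    rw [depthsLoop_cons, partB, partC]
    by_cases htop : d = 1 ∧ x = ','
    · have hpred : ((x, d).2 == (1:Int) && (x, d).1 == ',') = true := by
        simp [htop.1, htop.2]
      rw [List.zip_cons_cons, List.findIdx?_cons, if_pos hpred]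
      constructor
      · rw [if_pos (show d = 1 ∧ (false:Bool) = false ∧ x = ',' from ⟨htop.1, rfl, htop.2⟩)]
        rw [if_neg (show ¬ (d ≠ 0 ∧ (true:Bool) = false) from fun h => by simpa using h.2)]
        simp [partB_true]
      · rw [if_pos (show d = 1 ∧ (false:Bool) = false ∧ x = ',' from ⟨htop.1, rfl, htop.2⟩)]
        rw [if_neg (show ¬ (d ≠ 0 ∧ (true:Bool) = true ∧ (x ≠ ',' ∨ d ≠ 1)) from by
          rintro ⟨-, -, h | h⟩
          · exact h htop.2
          · exact h htop.1)]
        rw [partC_true, List.drop_zero, List.filter_cons,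
          if_neg (show ¬ ((x, d).2 != 0 && !((x, d).1 == ',' && (x, d).2 == 1)) = true from by
            simp [htop.1, htop.2])]
    · have hpred : ((x, d).2 == (1:Int) && (x, d).1 == ',') = false := by
        rcases not_and_or.mp htop with h | h <;> simp [h]
      have hflag : ¬ (d = 1 ∧ (false:Bool) = false ∧ x = ',') := by
        rintro ⟨h1, -, h2⟩; exact htop ⟨h1, h2⟩
      rw [List.zip_cons_cons, List.findIdx?_cons,
        if_neg (show ¬ ((x, d).2 == (1:Int) && (x, d).1 == ',') = true from by rw [hpred]; simp)]
      obtain ⟨ihB, ihC⟩ := ih (d + bracketFind x)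
      have hmatch : ∀ (o : Option Nat) (n : Nat),
          (match o.map (· + 1) with | some i => i | none => n + 1) =
          (match o with | some i => i | none => n) + 1 := by
        intro o n; cases o <;> rfl
      constructor
      · rw [if_neg hflag]
        by_cases hd : d = 0
        · rw [if_neg (show ¬ (d ≠ 0 ∧ (false:Bool) = false) from fun h => h.1 hd), ihB]
          rw [show ((x, d) :: xs.zip (depthsLoop (d + bracketFind x) xs)).length =
            (xs.zip (depthsLoop (d + bracketFind x) xs)).length + 1 from rfl, hmatch,
            List.take_succ_cons, List.filter_cons]
          rw [if_neg (show ¬ ((x, d).2 != 0) = true from by simp [hd])]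
        · rw [if_pos (show d ≠ 0 ∧ (false:Bool) = false from ⟨hd, rfl⟩), ihB]
          rw [show ((x, d) :: xs.zip (depthsLoop (d + bracketFind x) xs)).length =
            (xs.zip (depthsLoop (d + bracketFind x) xs)).length + 1 from rfl, hmatch,
            List.take_succ_cons, List.filter_cons]
          rw [if_pos (show ((x, d).2 != 0) = true from by simp [hd])]
          rfl
      · rw [if_neg hflag,
          if_neg (show ¬ (d ≠ 0 ∧ (false:Bool) = true ∧ (x ≠ ',' ∨ d ≠ 1)) from fun h => by simpa using h.2.1),
          ihC]
        rw [show ((x, d) :: xs.zip (depthsLoop (d + bracketFind x) xs)).length =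
          (xs.zip (depthsLoop (d + bracketFind x) xs)).length + 1 from rfl, hmatch,
          List.drop_succ_cons]

-- ===== VERDICT (by name: the statement is the Claim_ definition above) =====
theorem simpleParse_spec : Claim_equal_simpleParse := by
  unfold Claim_equal_simpleParse
  intro strInp deep output outputFlagSnd _ hpre
  obtain ⟨hout, hbal⟩ := hpre
  unfold Spec_simpleParse simpleParse simpleParse_alt
  have hnoerr : noErr strInp.toList deep = true := pre_to_noErr strInp.toList deep hbal
  have hany : ((strInp.toList.zip (depthsLoop deep strInp.toList)).any
      (fun p => p.1 == ')' && p.2 == 0)) = false := by rw [anyErr_eq, hnoerr]; rfl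
  cases output with
  | none =>
    rw [goA_eq strInp.toList deep _ outputFlagSnd (by simp) hnoerr,
      if_neg (show ¬ ((strInp.toList.zip (depthsLoop deep strInp.toList)).any
        (fun p => p.1 == ')' && p.2 == 0)) = true from by rw [hany]; simp)]
    cases outputFlagSnd with
    | true =>
      rw [if_pos rfl, partA_filter, partB_true, partC_true]
      simp
    | false =>
      rw [if_neg (show ¬ (false : Bool) = true from by simp), partA_filter,
        (partBC_false strInp.toList deep).1, (partBC_false strInp.toList deep).2]
      simp
  | some l =>
    rw [goA_eq strInp.toList deep _ outputFlagSnd (hout l rfl) hnoerr,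
      if_neg (show ¬ ((strInp.toList.zip (depthsLoop deep strInp.toList)).any
        (fun p => p.1 == ')' && p.2 == 0)) = true from by rw [hany]; simp)]
    cases outputFlagSnd with
    | true =>
      rw [if_pos rfl, partA_filter, partB_true, partC_true]
      simp
    | false =>
      rw [if_neg (show ¬ (false : Bool) = true from by simp), partA_filter,
        (partBC_false strInp.toList deep).1, (partBC_false strInp.toList deep).2]
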